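-- pv_equiv track=rewrite | github.com/JoakimSkoog97/AdventOfCode | main_refactored.py | create_towers_from_lines
-- ===== SOURCE A (Python) =====
-- def create_towers_from_lines(lines):
--     """
--     Creates a towers dictionary from a list of strings.
--
--     :param lines: A list of strings.
--     :return: A towers dictionary.
--     """
--     # Initialize the towers dictionary
--     towers = {}
--
--     # Create the towers from the lines
--     for i, line in enumerate(lines):
--         # Split the line into elements
--         elements = line.strip().split("_")
--
--         # Add each element to the appropriate tower, stripping the brackets and whitespace
--         for j, element in enumerate(elements):
--             element = element.strip().strip("[]")
--             if not element:
--                 continue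
--
--             tower_num = j + 1
--             if tower_num not in towers:
--                 towers[tower_num] = []
--             towers[tower_num].append(element)
--
--     return towers
-- ===== SOURCE B (Python) =====
-- def create_towers_from_lines(lines):
--     """
--     Creates a towers dictionary from a list of strings.
--
--     :param lines: A list of strings.
--     :return: A towers dictionary.
--     """
--     # One flat pass: all (tower number, cleaned cell) pairs, row by row
--     pairs = [(j + 1, cell)
--              for line in lines
--              for j, e in enumerate(line.strip().split("_"))
--              if (cell := e.strip().strip("[]"))]
--     # Tower numbers in order of first appearance, then gather each tower's cells
--     keys = dict.fromkeys(j for j, _ in pairs)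
--     return {k: [cell for j, cell in pairs if j == k] for k in keys}
-- ===== Notes on version B (the rewrite author's own statement) =====
-- stated objective: alternative
-- what changed: Replaces A's incremental dict mutation (membership test, insert-empty, append per cell) with a flatten-then-group pipeline: one flat list of (tower, cell) pairs, first-occurrence key order via dict.fromkeys, then a gather pass per key.
import Mathlib
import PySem

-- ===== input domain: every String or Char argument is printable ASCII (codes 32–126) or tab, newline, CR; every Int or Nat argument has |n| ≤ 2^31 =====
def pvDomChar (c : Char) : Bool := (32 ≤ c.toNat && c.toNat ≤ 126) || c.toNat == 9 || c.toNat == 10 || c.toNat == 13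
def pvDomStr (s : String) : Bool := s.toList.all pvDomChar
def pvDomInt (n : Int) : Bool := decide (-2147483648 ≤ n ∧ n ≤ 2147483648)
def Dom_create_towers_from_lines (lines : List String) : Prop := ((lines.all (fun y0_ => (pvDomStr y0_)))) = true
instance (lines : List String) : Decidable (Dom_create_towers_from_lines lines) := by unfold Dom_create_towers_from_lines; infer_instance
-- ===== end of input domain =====

-- B replaces A's incremental dict mutation with a flatten-then-group pipeline (alternative decomposition, same result).

-- ===== PORT A =====
-- A's inner-loop body: clean the cell, skip empties, insert [] if the tower
-- key is new, append the cell to that tower's list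
def pvStepA (towers : PySem.Dict Int (List String)) (je : Int × String) : PySem.Dict Int (List String) :=
  let element := PySem.Str.stripChars (PySem.Str.strip je.2) "[]"
  if element = "" then towers
  else
    let tower_num : Int := je.1 + 1
    let towers := if towers.contains tower_num then towers else towers.insert tower_num []
    towers.modify tower_num [] (fun l => l ++ [element])

def create_towers_from_lines (lines : List String) : List (Int × List String) :=
  (lines.foldl
    (fun (towers : PySem.Dict Int (List String)) line =>
      (PySem.List.enumerate ((PySem.Str.split? (PySem.Str.strip line) "_").getD []) 0).foldl
        pvStepA towers)
    PySem.Dict.empty).items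

-- ===== PORT B =====
-- B: the nonempty cleaned cells of one line, paired with their tower numbers
def pvRowPairs (line : String) : List (Int × String) :=
  (PySem.List.enumerate ((PySem.Str.split? (PySem.Str.strip line) "_").getD []) 0).filterMap
    (fun je =>
      let cell := PySem.Str.stripChars (PySem.Str.strip je.2) "[]"
      if cell = "" then none else some (je.1 + 1, cell))

def create_towers_from_lines_alt (lines : List String) : List (Int × List String) :=
  let pairs := (lines.map pvRowPairs).flatten
  let keys := PySem.List.dedup (pairs.map (·.1))
  keys.map (fun k => (k, (pairs.filter (fun p => p.1 == k)).map (·.2)))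

-- ===== PRECONDITION & SPEC =====
def Spec_create_towers_from_lines (lines : List String) (out : List (Int × List String)) : Prop := out = create_towers_from_lines_alt lines
instance (lines : List String) (out : List (Int × List String)) : Decidable (Spec_create_towers_from_lines lines out) := by unfold Spec_create_towers_from_lines; infer_instance

-- ===== CLAIM (what is proved, stated in full; the proofs are below) =====
def Claim_equal_create_towers_from_lines : Prop := ∀ (lines : List String), Dom_create_towers_from_lines lines → Spec_create_towers_from_lines lines (create_towers_from_lines lines)

-- ===== LEMMAS AND PROOFS =====

-- the grouping step both sides reduce to: d[p.1] = d.get(p.1, []) ++ [p.2]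
def pvStep (d : PySem.Dict Int (List String)) (p : Int × String) : PySem.Dict Int (List String) :=
  d.modify p.1 [] (fun l => l ++ [p.2])

-- A's "insert [] if absent, then append" equals a single modify-append
theorem pv_branch_eq (d : PySem.Dict Int (List String)) (k : Int) (e : String) :
    (let t := if d.contains k then d else d.insert k []
     t.modify k [] (fun l => l ++ [e])) = d.modify k [] (fun l => l ++ [e]) := by
  by_cases h : d.contains k
  · simp [h]
  · have hins : d.contains k = false := by simpa using h
    have hget : d.get? k = none := (PySem.Dict.get?_eq_none_iff_contains d k).2 hins
    simp only [hins, Bool.false_eq_true, if_false]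
    unfold PySem.Dict.modify
    rw [PySem.Dict.getD_insert_self]
    have hgd : d.getD k [] = [] := by simp [PySem.Dict.getD, hget]
    rw [hgd]
    apply PySem.Dict.ext
    have hany : d.items.any (fun p => p.1 == k) = false := hins
    have hmap : List.map (fun (p : Int × List String) => if (p.1 == k) = true then (k, ([e] : List String)) else p) d.items = List.map id d.items := by
      apply List.map_congr_left
      intro p hp
      have hpk : ¬ ((p.1 == k) = true) := List.any_eq_false.mp hany p hp
      simp [Bool.eq_false_iff.mpr hpk]
    unfold PySem.Dict.insert PySem.Dict.contains
    simp only [hany, Bool.false_eq_true, if_false, List.any_append,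
      List.any_cons, List.any_nil, BEq.rfl, Bool.true_or, Bool.or_true, if_true]
    simp only [List.nil_append]
    rw [List.map_append, hmap, List.map_id]
    simp

-- A's inner loop over a row = pvStep folded over that row's filtered pairs
theorem pv_inner_eq (l : List (Int × String)) (d : PySem.Dict Int (List String)) :
    l.foldl pvStepA d
    = (l.filterMap (fun je =>
        let cell := PySem.Str.stripChars (PySem.Str.strip je.2) "[]"
        if cell = "" then none else some (je.1 + 1, cell))).foldl pvStep d := by
  induction l generalizing d with
  | nil => simp only [List.filterMap_nil, List.foldl_nil]
  | cons je rest ih =>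
    simp only [List.foldl_cons, List.filterMap_cons]
    by_cases hc : PySem.Str.stripChars (PySem.Str.strip je.2) "[]" = ""
    · rw [show pvStepA d je = d by unfold pvStepA; rw [if_pos hc]]
      rw [show (if PySem.Str.stripChars (PySem.Str.strip je.2) "[]" = "" then none else some (je.1 + 1, PySem.Str.stripChars (PySem.Str.strip je.2) "[]")) = (none : Option (Int × String)) from if_pos hc]
      exact ih d
    · rw [show (if PySem.Str.stripChars (PySem.Str.strip je.2) "[]" = "" then none else some (je.1 + 1, PySem.Str.stripChars (PySem.Str.strip je.2) "[]")) = some (je.1 + 1, PySem.Str.stripChars (PySem.Str.strip je.2) "[]") from if_neg hc]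
      rw [show pvStepA d je = pvStep d (je.1 + 1, PySem.Str.stripChars (PySem.Str.strip je.2) "[]") by
        unfold pvStepA pvStep; rw [if_neg hc]; exact pv_branch_eq d (je.1+1) _]
      simp only [List.foldl_cons]
      exact ih _

-- an association list with distinct keys is the map of its own lookups over its keys
theorem pv_items_eq (l : List (Int × List String)) (h : (l.map Prod.fst).Nodup) :
    l = (l.map Prod.fst).map (fun k => (k, (PySem.Dict.mk l).getD k [])) := by
  induction l with
  | nil => rfl
  | cons p rest ih =>
    obtain ⟨k, v⟩ := p
    simp only [List.map_cons, List.nodup_cons] at h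
    obtain ⟨hk, hrest⟩ := h
    simp only [List.map_cons]
    have h1 : (PySem.Dict.mk ((k,v)::rest)).getD k [] = v := by
      simp [PySem.Dict.getD, PySem.Dict.get?_mk_cons]
    have h2 : List.map (fun k1 => (k1, (PySem.Dict.mk ((k,v)::rest)).getD k1 [])) (List.map Prod.fst rest)
        = List.map (fun k1 => (k1, (PySem.Dict.mk rest).getD k1 [])) (List.map Prod.fst rest) := by
      apply List.map_congr_left
      intro k1 hk1
      have hne : (k == k1) = false := by
        apply Bool.eq_false_iff.mpr
        intro hb
        exact hk (beq_iff_eq.mp hb ▸ hk1)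
      simp [PySem.Dict.getD, PySem.Dict.get?_mk_cons, hne]
    rw [h1, h2, ← ih hrest]

theorem pv_main (lines : List String) :
    create_towers_from_lines lines = create_towers_from_lines_alt lines := by
  unfold create_towers_from_lines create_towers_from_lines_alt
  have hfold : lines.foldl
      (fun (towers : PySem.Dict Int (List String)) line =>
        (PySem.List.enumerate ((PySem.Str.split? (PySem.Str.strip line) "_").getD []) 0).foldl
          pvStepA towers)
      PySem.Dict.empty
      = ((lines.map pvRowPairs).flatten).foldl pvStep PySem.Dict.empty := by
    rw [List.foldl_flatten, List.foldl_map]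
    have hfun : (fun (d : PySem.Dict Int (List String)) line =>
        (PySem.List.enumerate ((PySem.Str.split? (PySem.Str.strip line) "_").getD []) 0).foldl pvStepA d)
        = (fun d line => (pvRowPairs line).foldl pvStep d) := by
      funext d line
      exact pv_inner_eq _ d
    rw [hfun]
  rw [hfold]
  set pairs := (lines.map pvRowPairs).flatten with hpairs
  have hstep : pairs.foldl pvStep PySem.Dict.empty
      = pairs.foldl (fun d p => d.modify p.1 [] (fun l => l ++ [p.2])) PySem.Dict.empty := rfl
  have hkeys : (pairs.foldl pvStep PySem.Dict.empty).keys = PySem.List.dedup (pairs.map (·.1)) := by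
    rw [hstep, PySem.Dict.keys_foldl_modify_key pairs Prod.fst [] (fun _ p => (fun l => l ++ [p.2]))]
    simp [PySem.List.dedup_eq_ofList, PySem.Dict.empty, PySem.Dict.keys]
    rfl
  have hnodup : ((pairs.foldl pvStep PySem.Dict.empty).items.map Prod.fst).Nodup := by
    rw [hstep]
    exact PySem.Dict.nodup_keys_foldl_modify_key pairs Prod.fst [] (fun _ p => (fun l => l ++ [p.2])) PySem.Dict.empty (by simp [PySem.Dict.empty, PySem.Dict.keys])
  have hgetD : ∀ k, (pairs.foldl pvStep PySem.Dict.empty).getD k []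
      = (pairs.filter (fun p => p.1 == k)).map (·.2) := by
    intro k
    rw [hstep, PySem.Dict.getD_foldl_modify_append]
    simp [PySem.Dict.getD, PySem.Dict.get?, PySem.Dict.empty]
  calc (pairs.foldl pvStep PySem.Dict.empty).items
      = ((pairs.foldl pvStep PySem.Dict.empty).items.map Prod.fst).map
          (fun k => (k, (PySem.Dict.mk (pairs.foldl pvStep PySem.Dict.empty).items).getD k [])) :=
        pv_items_eq _ hnodup
    _ = (PySem.List.dedup (pairs.map (·.1))).map (fun k => (k, (pairs.filter (fun p => p.1 == k)).map (·.2))) := by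
        have : (pairs.foldl pvStep PySem.Dict.empty).items.map Prod.fst = PySem.List.dedup (pairs.map (·.1)) := hkeys
        rw [this]
        apply List.map_congr_left
        intro k _
        rw [show PySem.Dict.mk (pairs.foldl pvStep PySem.Dict.empty).items = pairs.foldl pvStep PySem.Dict.empty from rfl]
        rw [hgetD k]

-- ===== VERDICT (by name: the statement is the Claim_ definition above) =====
theorem create_towers_from_lines_spec : Claim_equal_create_towers_from_lines := by
  intro lines _
  unfold Spec_create_towers_from_lines
  exact pv_main lines
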